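-- pv_equiv track=rewrite | github.com/Phucptit2003/Python-PTIT | BN04.py | find_dmin_from_columns
-- ===== SOURCE A (Python) =====
-- def find_dmin_from_columns(H):
--     n = len(H[0])
--     dmin = n
--     for i in range(n):
--         column_weight = sum([H[j][i] for j in range(len(H))])
--         if column_weight < dmin:
--             dmin = column_weight
--     return dmin
-- ===== SOURCE B (Python) =====
-- def find_dmin_from_columns(H):
--     n = len(H[0])
--     col_sums = [0] * n
--     for row in H:
--         col_sums = [s + x for s, x in zip(col_sums, row)]
--     return min([n] + col_sums)
-- ===== Notes on version B (the rewrite author's own statement) =====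
-- stated objective: alternative
-- what changed: Replaces A's column-outer/row-inner nested indexed scan by a single row-major pass accumulating per-column sums via zip, followed by one min over [n]+col_sums (seeded with n to keep A's cap).
import Mathlib
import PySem

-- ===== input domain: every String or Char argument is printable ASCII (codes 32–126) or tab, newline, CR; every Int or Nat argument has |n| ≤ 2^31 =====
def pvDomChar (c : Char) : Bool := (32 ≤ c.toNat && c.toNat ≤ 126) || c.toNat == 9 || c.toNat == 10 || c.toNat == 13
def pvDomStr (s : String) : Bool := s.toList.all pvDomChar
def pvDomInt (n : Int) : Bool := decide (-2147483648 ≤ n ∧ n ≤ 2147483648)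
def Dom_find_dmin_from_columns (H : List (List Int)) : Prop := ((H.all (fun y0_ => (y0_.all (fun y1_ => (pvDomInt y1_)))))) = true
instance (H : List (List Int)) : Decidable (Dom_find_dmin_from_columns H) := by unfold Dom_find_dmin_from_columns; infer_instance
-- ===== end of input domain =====

-- B replaces A's column-outer nested scan by one row-major zip accumulation plus a single min; return value only, equal on Pre_.

-- ===== PORT A =====
def find_dmin_from_columns (H : List (List Int)) : Int :=
  let n : Int := ((H.headD []).length : Int)
  (PySem.List.pyRange 0 n 1).foldl
    (fun dmin i =>
      let column_weight :=
        ((PySem.List.pyRange 0 (PySem.List.len H) 1).map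
          (fun j => PySem.List.pyGetD (PySem.List.pyGetD H j []) i 0)).sum
      if column_weight < dmin then column_weight else dmin) n

-- ===== PORT B =====
def find_dmin_from_columns_alt (H : List (List Int)) : Int :=
  let n := (H.headD []).length
  let col_sums := H.foldl
    (fun sums row => List.zipWith (fun s x => s + x) sums row)
    (List.replicate n (0 : Int))
  (PySem.List.min? ((n : Int) :: col_sums) (fun y => y)).getD 0

-- ===== PRECONDITION & SPEC =====
-- Pre_ excludes exactly the inputs on which Python A raises IndexError: an empty matrix, or a matrix with some row shorter than its first row.
def Pre_find_dmin_from_columns (H : List (List Int)) : Prop :=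
  H ≠ [] ∧ ∀ row ∈ H, (H.headD []).length ≤ row.length
instance (H : List (List Int)) : Decidable (Pre_find_dmin_from_columns H) := by
  unfold Pre_find_dmin_from_columns; infer_instance
def pvWitness_find_dmin_from_columns : List (List Int) := [[0, 1], [1, 0]]

def Spec_find_dmin_from_columns (H : List (List Int)) (out : Int) : Prop := out = find_dmin_from_columns_alt H
instance (H : List (List Int)) (out : Int) : Decidable (Spec_find_dmin_from_columns H out) := by unfold Spec_find_dmin_from_columns; infer_instance

-- ===== CLAIM (what is proved, stated in full; the proofs are below) =====
def Claim_equal_find_dmin_from_columns : Prop := ∀ (H : List (List Int)), Dom_find_dmin_from_columns H → Pre_find_dmin_from_columns H → Spec_find_dmin_from_columns H (find_dmin_from_columns H)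

-- ===== LEMMAS AND PROOFS =====

-- one zip step on a table of the form (range n).map g, when the row is long enough
theorem zip_step (n : Nat) (g : Nat → Int) (row : List Int) (h : n ≤ row.length) :
    List.zipWith (fun s x => s + x) ((List.range n).map g) row
      = (List.range n).map (fun i => g i + row.getD i 0) := by
  apply List.ext_getElem
  · simp [Nat.min_eq_left h]
  · intro i h1 h2
    have hi : i < n := by simpa using h2
    have hrow : i < row.length := lt_of_lt_of_le hi h
    simp [List.getD_eq_getElem?_getD, List.getElem?_eq_getElem hrow]

-- the whole row-major accumulation equals the column-sum table
theorem sums_char (H : List (List Int)) (n : Nat) (h : ∀ row ∈ H, n ≤ row.length)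
    (g : Nat → Int) :
    H.foldl (fun sums row => List.zipWith (fun s x => s + x) sums row) ((List.range n).map g)
      = (List.range n).map (fun i => g i + (H.map (fun r => r.getD i 0)).sum) := by
  induction H generalizing g with
  | nil => simp
  | cons row t ih =>
    simp only [List.foldl_cons]
    rw [zip_step n g row (h row (by simp))]
    rw [ih (fun r hr => h r (by simp [hr])) (fun i => g i + row.getD i 0)]
    apply List.map_congr_left
    intro i _
    simp [add_assoc]

theorem if_lt_eq_min (d c : Int) : (if c < d then c else d) = min d c := by
  rw [min_def]; split_ifs <;> omega

-- A reduces to a fold of min over the column-sum table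
theorem A_char (H : List (List Int)) :
    find_dmin_from_columns H
      = (List.range (H.headD []).length).foldl
          (fun d k => min d ((H.map (fun r => r.getD k 0)).sum))
          ((H.headD []).length : Int) := by
  unfold find_dmin_from_columns
  simp only []
  rw [PySem.List.pyRange_zero_nat, List.foldl_map]
  apply List.foldl_ext
  intro d k _
  have hmap : (PySem.List.pyRange 0 (PySem.List.len H) 1).map
      (fun j => PySem.List.pyGetD (PySem.List.pyGetD H j []) (k : Int) 0)
      = H.map (fun r => PySem.List.pyGetD r (k : Int) 0) := by
    rw [show (fun j => PySem.List.pyGetD (PySem.List.pyGetD H j []) (k : Int) 0)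
        = (fun r => PySem.List.pyGetD r (k : Int) 0) ∘ (fun j => PySem.List.pyGetD H j []) from rfl,
      ← List.map_map, PySem.List.map_pyGetD_pyRange_zero]
  rw [hmap, if_lt_eq_min]
  simp

-- ===== VERDICT (by name: the statement is the Claim_ definition above) =====
theorem find_dmin_from_columns_spec : Claim_equal_find_dmin_from_columns := by
  unfold Claim_equal_find_dmin_from_columns
  intro H _ hPre
  unfold Spec_find_dmin_from_columns find_dmin_from_columns_alt
  simp only []
  rw [show (List.replicate (H.headD []).length (0 : Int))
      = (List.range (H.headD []).length).map (fun _ => (0 : Int)) by simp [List.map_const']]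
  rw [sums_char H (H.headD []).length hPre.2 (fun _ => 0)]
  rw [PySem.List.min?_id_cons, Option.getD_some, List.foldl_map, A_char]
  apply List.foldl_ext
  intro d k _
  simp
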